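-- pv_equiv track=rewrite | github.com/vishnuas22/Aura | backend/research_tools/wikipedia_search.py | _filter_relevant_links
-- ===== SOURCE A (Python) =====
-- from typing import List, Dict, Any, Optional, Set
--
-- def _filter_relevant_links(links: List[str], query: str) -> List[str]:
--     """Filter links based on relevance to query."""
--     query_terms = set(query.lower().split())
--     relevant_links = []
--
--     for link in links:
--         link_lower = link.lower()
--         link_terms = set(link_lower.split())
--
--         # Calculate overlap between query terms and link terms
--         overlap = len(query_terms & link_terms)
--
--         if overlap > 0:
--             relevant_links.append((link, overlap))
--
--     # Sort by relevance and return top links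
--     relevant_links.sort(key=lambda x: x[1], reverse=True)
--     return [link for link, _ in relevant_links[:10]]  # Top 10 relevant links
-- ===== SOURCE B (Python) =====
-- def _filter_relevant_links(links, query):
--     """Filter links based on relevance to query."""
--     query_terms = set(query.lower().split())
--     result = []
--     # walk possible overlap counts from highest to lowest (selection passes,
--     # like a counting sort); within a pass links keep their input order,
--     # which matches the stable descending sort of A
--     for k in range(len(query_terms), 0, -1):
--         for link in links:
--             if len(query_terms & set(link.lower().split())) == k:
--                 result.append(link)
--     return result[:10]
-- ===== Notes on version B (the rewrite author's own statement) =====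
-- stated objective: alternative
-- what changed: B replaces A's build-(link,overlap)-pairs / stable-descending-sort / slice pipeline with counting-sort-style selection passes: for each possible overlap count from len(query_terms) down to 1 it appends, in input order, the links whose overlap equals that count, then takes the first 10.
import Mathlib
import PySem

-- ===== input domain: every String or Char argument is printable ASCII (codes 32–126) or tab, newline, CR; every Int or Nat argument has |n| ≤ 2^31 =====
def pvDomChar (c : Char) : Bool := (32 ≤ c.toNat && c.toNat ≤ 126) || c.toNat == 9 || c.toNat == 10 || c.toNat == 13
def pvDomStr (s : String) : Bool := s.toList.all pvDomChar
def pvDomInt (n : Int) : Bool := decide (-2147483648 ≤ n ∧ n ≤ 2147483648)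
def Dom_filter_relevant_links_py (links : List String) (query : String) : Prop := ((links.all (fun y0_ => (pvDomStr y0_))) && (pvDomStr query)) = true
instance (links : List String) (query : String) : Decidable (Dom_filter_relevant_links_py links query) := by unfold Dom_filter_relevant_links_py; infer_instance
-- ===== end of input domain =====

-- B replaces the build-pairs / stable-sort-descending / slice pipeline with counting-sort-style
-- selection passes: for each possible overlap count, from the highest down to 1, it appends the
-- links with exactly that overlap in input order (objective: alternative algorithm, same result).

-- ===== PORT A =====
def filter_relevant_links_py (links : List String) (query : String) : List String :=
  let query_terms : PySem.Set String := PySem.Set.ofList (PySem.Str.split₀ (PySem.Str.lower query))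
  let relevant_links : List (String × Int) :=
    links.foldl (fun acc link =>
      let link_lower := PySem.Str.lower link
      let link_terms : PySem.Set String := PySem.Set.ofList (PySem.Str.split₀ link_lower)
      let overlap : Int := PySem.Set.len (PySem.Set.inter query_terms link_terms)
      if 0 < overlap then acc ++ [(link, overlap)] else acc) []
  let sorted_links := PySem.List.sorted relevant_links (fun x => x.2) true
  (PySem.List.slice sorted_links none (some 10)).map (fun p => p.1)

-- ===== PORT B =====
def filter_relevant_links_py_alt (links : List String) (query : String) : List String :=
  let query_terms : PySem.Set String := PySem.Set.ofList (PySem.Str.split₀ (PySem.Str.lower query))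
  let result : List String :=
    (PySem.List.pyRange (PySem.Set.len query_terms) 0 (-1)).foldl (fun result k =>
      links.foldl (fun result link =>
        if (PySem.Set.len (PySem.Set.inter query_terms (PySem.Set.ofList (PySem.Str.split₀ (PySem.Str.lower link)))) == k)
        then result ++ [link] else result) result) []
  PySem.List.slice result none (some 10)

-- ===== PRECONDITION & SPEC =====
def Spec_filter_relevant_links_py (links : List String) (query : String) (out : List String) : Prop := out = filter_relevant_links_py_alt links query
instance (links : List String) (query : String) (out : List String) : Decidable (Spec_filter_relevant_links_py links query out) := by unfold Spec_filter_relevant_links_py; infer_instance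

-- ===== CLAIM (what is proved, stated in full; the proofs are below) =====
def Claim_equal_filter_relevant_links_py : Prop := ∀ (links : List String) (query : String), Dom_filter_relevant_links_py links query → Spec_filter_relevant_links_py links query (filter_relevant_links_py links query)

-- ===== LEMMAS AND PROOFS =====

-- overlap of a link with the query-term set
def pvOv (qt : PySem.Set String) (link : String) : Int :=
  PySem.Set.len (PySem.Set.inter qt (PySem.Set.ofList (PySem.Str.split₀ (PySem.Str.lower link))))

-- [q, q-1, …, 1]
def pvDescList : Nat → List Int
  | 0 => []
  | k + 1 => ((k : Int) + 1) :: pvDescList k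

-- descending stable grouping by key value, q down to 1
def pvGrouped {α : Type} (key : α → Int) : Nat → List α → List α
  | 0, _ => []
  | k + 1, xs => xs.filter (fun x => key x == ((k : Int) + 1)) ++ pvGrouped key k xs

theorem pvOv_le (qt : PySem.Set String) (link : String) : pvOv qt link ≤ (qt.length : Int) := by
  simp only [pvOv, PySem.Set.len, PySem.Set.inter]
  exact_mod_cast List.length_filter_le _ _

theorem pvDesc_map (q : Nat) : (List.range q).map (fun (k : Nat) => (q : Int) - (k : Int)) = pvDescList q := by
  induction q with
  | zero => rfl
  | succ n ih =>
    rw [List.range_succ_eq_map, List.map_cons, List.map_map, pvDescList]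
    congr 1
    rw [← ih]
    apply List.map_congr_left
    intro k _
    simp only [Function.comp_apply]
    push_cast; ring

theorem pvRange_desc (q : Nat) : PySem.List.pyRange (q : Int) 0 (-1) = pvDescList q := by
  rw [← pvDesc_map]
  simp only [PySem.List.pyRange]
  norm_num
  rcases Nat.eq_zero_or_pos q with h0 | h0
  · simp [h0]
  · rw [if_pos (by exact_mod_cast h0)]
    apply List.map_congr_left
    intro k _
    ring

theorem pvGrouped_nil {α : Type} (key : α → Int) (q : Nat) : pvGrouped key q [] = [] := by
  induction q with
  | zero => rfl
  | succ k ih => simp [pvGrouped, ih]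

theorem pvGrouped_append_singleton_of_gt {α : Type} (key : α → Int) (q : Nat) (xs : List α) (x : α)
    (h : (q : Int) < key x) : pvGrouped key q (xs ++ [x]) = pvGrouped key q xs := by
  induction q with
  | zero => rfl
  | succ k ih =>
    have hk : ((k : Int) + 1) < key x := by push_cast at h ⊢; omega
    simp only [pvGrouped, List.filter_append, ih (by push_cast at h ⊢; omega)]
    have hne : (key x == ((k : Int) + 1)) = false := by
      simp only [beq_eq_false_iff_ne, ne_eq]; omega
    simp [List.filter, hne]

theorem pvMem_grouped {α : Type} (key : α → Int) (q : Nat) (xs : List α) (y : α)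
    (h : y ∈ pvGrouped key q xs) : 1 ≤ key y ∧ key y ≤ (q : Int) := by
  induction q with
  | zero => simp [pvGrouped] at h
  | succ k ih =>
    simp only [pvGrouped, List.mem_append, List.mem_filter] at h
    rcases h with ⟨_, h⟩ | h
    · have := of_decide_eq_true h
      push_cast; omega
    · have := ih h
      push_cast at this ⊢; omega

theorem pvInsertBy_skip {α : Type} (bef : α → α → Bool) (x : α) (as bs : List α)
    (h : ∀ a ∈ as, bef x a = false) :
    PySem.List.insertBy bef x (as ++ bs) = as ++ PySem.List.insertBy bef x bs := by
  induction as with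
  | nil => rfl
  | cons a as ih =>
    simp only [List.cons_append, PySem.List.insertBy, h a (by simp)]
    simp only [Bool.false_eq_true, if_false, List.cons.injEq, true_and]
    exact ih (fun a ha => h a (by simp [ha]))

theorem pvInsertBy_front {α : Type} (bef : α → α → Bool) (x : α) (bs : List α)
    (h : ∀ b ∈ bs, bef x b = true) : PySem.List.insertBy bef x bs = x :: bs := by
  cases bs with
  | nil => rfl
  | cons b bs => simp [PySem.List.insertBy, h b (by simp)]

theorem pvInsertBy_grouped {α : Type} (key : α → Int) (q : Nat) (xs : List α) (x : α)
    (hx1 : 1 ≤ key x) (hx2 : key x ≤ (q : Int)) :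
    PySem.List.insertBy (fun a b => decide (key b < key a)) x (pvGrouped key q xs)
      = pvGrouped key q (xs ++ [x]) := by
  induction q with
  | zero => simp at hx2; omega
  | succ k ih =>
    by_cases hq : key x = (k : Int) + 1
    · have hskip : ∀ a ∈ xs.filter (fun y => key y == ((k : Int) + 1)), (fun a b => decide (key b < key a)) x a = false := by
        intro a ha
        have ha' : key a = (k : Int) + 1 := by simpa using (List.mem_filter.mp ha).2
        simp [ha', hq]
      have hfront : ∀ b ∈ pvGrouped key k xs, (fun a b => decide (key b < key a)) x b = true := by
        intro b hb
        have := pvMem_grouped key k xs b hb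
        simp only [decide_eq_true_eq]; omega
      rw [pvGrouped, pvInsertBy_skip _ _ _ _ hskip, pvInsertBy_front _ _ _ hfront,
        pvGrouped, List.filter_append, pvGrouped_append_singleton_of_gt key k xs x (by omega)]
      simp [List.filter, hq]
    · have hx2' : key x ≤ (k : Int) := by push_cast at hx2; omega
      have hskip : ∀ a ∈ xs.filter (fun y => key y == ((k : Int) + 1)), (fun a b => decide (key b < key a)) x a = false := by
        intro a ha
        have ha' : key a = (k : Int) + 1 := by simpa using (List.mem_filter.mp ha).2
        simp only [decide_eq_false_iff_not, not_lt]; omega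
      rw [pvGrouped, pvInsertBy_skip _ _ _ _ hskip, ih hx2', pvGrouped, List.filter_append]
      have hne : (key x == ((k : Int) + 1)) = false := by
        simp only [beq_eq_false_iff_ne, ne_eq]; omega
      simp [List.filter, hne]

theorem pvSorted_eq_grouped {α : Type} (key : α → Int) (q : Nat) (xs : List α)
    (h : ∀ y ∈ xs, 1 ≤ key y ∧ key y ≤ (q : Int)) :
    PySem.List.sorted xs key true = pvGrouped key q xs := by
  rw [PySem.List.sorted_rev_eq_foldl_insertBy]
  induction xs using List.reverseRecOn with
  | nil => simp [pvGrouped_nil]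
  | append_singleton xs x ih =>
    rw [List.foldl_append, List.foldl_cons, List.foldl_nil,
      ih (fun y hy => h y (by simp [hy])),
      pvInsertBy_grouped key q xs x (h x (by simp)).1 (h x (by simp)).2]

-- A's pair-building loop, beta-reduced
theorem pvFoldl_pairs (ov : String → Int) (links : List String) (acc : List (String × Int)) :
    links.foldl (fun acc link => if 0 < ov link then acc ++ [(link, ov link)] else acc) acc
      = acc ++ (links.filter (fun l => decide (0 < ov l))).map (fun l => (l, ov l)) := by
  induction links generalizing acc with
  | nil => simp
  | cons l ls ih =>
    by_cases h : 0 < ov l <;> simp [List.filter, h, ih, List.append_assoc]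

theorem pvGrouped_map_fst (ov : String → Int) (links : List String) (q : Nat) :
    (pvGrouped (fun p => p.2) q ((links.filter (fun l => decide (0 < ov l))).map (fun l => (l, ov l)))).map (fun p : String × Int => p.1)
      = (pvDescList q).flatMap (fun k => links.filter (fun l => ov l == k)) := by
  induction q with
  | zero => simp [pvGrouped, pvDescList]
  | succ k ih =>
    simp only [pvGrouped, pvDescList, List.flatMap_cons, List.map_append, ih]
    congr 1
    rw [List.filter_map, List.map_map]
    have h1 : (fun p : String × Int => p.1) ∘ (fun l => (l, ov l)) = id := rfl
    rw [h1, List.map_id, List.filter_filter]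
    apply List.filter_congr
    intro l _
    by_cases h : ov l = (k : Int) + 1
    · have h0 : (0 : Int) < ov l := by omega
      simp [h0]
    · simp [h]

theorem pvSlice10 {α : Type} (xs : List α) : PySem.List.slice xs none (some 10) = xs.take 10 := by
  rw [PySem.List.slice_to xs (b := 10) (by norm_num)]
  rfl

theorem pvOuter (ov : String → Int) (links : List String) (ks : List Int) (acc : List String) :
    ks.foldl (fun acc k => links.foldl (fun acc link => if ov link == k then acc ++ [link] else acc) acc) acc
      = acc ++ ks.flatMap (fun k => links.filter (fun l => ov l == k)) := by
  induction ks generalizing acc with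
  | nil => simp
  | cons k ks ih =>
    rw [List.foldl_cons, PySem.List.foldl_append_if_eq_filter, ih, List.flatMap_cons,
      List.append_assoc]

theorem filter_relevant_links_eq (links : List String) (query : String) :
    filter_relevant_links_py links query = filter_relevant_links_py_alt links query := by
  have hA : filter_relevant_links_py links query
      = ((PySem.List.sorted
            (links.foldl (fun acc link =>
              if 0 < pvOv (PySem.Set.ofList (PySem.Str.split₀ (PySem.Str.lower query))) link
              then acc ++ [(link, pvOv (PySem.Set.ofList (PySem.Str.split₀ (PySem.Str.lower query))) link)]
              else acc) [])
            (fun x => x.2) true).take 10).map (fun p => p.1) := by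
    rw [← pvSlice10]; rfl
  have hB : filter_relevant_links_py_alt links query
      = ((PySem.List.pyRange ((PySem.Set.ofList (PySem.Str.split₀ (PySem.Str.lower query))).length : Int) 0 (-1)).foldl
          (fun result k => links.foldl (fun result link =>
            if pvOv (PySem.Set.ofList (PySem.Str.split₀ (PySem.Str.lower query))) link == k
            then result ++ [link] else result) result) []).take 10 := by
    rw [← pvSlice10]; rfl
  set qt : PySem.Set String := PySem.Set.ofList (PySem.Str.split₀ (PySem.Str.lower query)) with hqt
  rw [hA, hB, pvFoldl_pairs, List.nil_append, pvRange_desc qt.length, pvOuter, List.nil_append,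
    pvSorted_eq_grouped (fun p : String × Int => p.2) qt.length
      ((links.filter (fun l => decide (0 < pvOv qt l))).map (fun l => (l, pvOv qt l)))
      (by
        intro y hy
        simp only [List.mem_map, List.mem_filter] at hy
        obtain ⟨l, ⟨_, hl⟩, rfl⟩ := hy
        exact ⟨by simpa using of_decide_eq_true hl, pvOv_le qt l⟩)]
  rw [List.map_take, pvGrouped_map_fst]

-- ===== VERDICT (by name: the statement is the Claim_ definition above) =====
theorem filter_relevant_links_py_spec : Claim_equal_filter_relevant_links_py := by
  intro links query _
  show filter_relevant_links_py links query = filter_relevant_links_py_alt links query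
  exact filter_relevant_links_eq links query
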